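-- pv_equiv track=rewrite | github.com/jeffspence/ldpop | ldpop/lookup_table.py | makeRhoGrid
-- ===== SOURCE A (Python) =====
-- from builtins import zip
-- from itertools import product
--
-- def makeRhoGrid(rhos, rho_counts):
--     rho_grid = []
--     for raw_rhos in product(rhos, repeat=len(rho_counts)):
--         this_list = []
--         for count, rr in zip(rho_counts, reversed(raw_rhos)):
--             this_list.extend([rr] * count)
--         rho_grid.append(this_list)
--     return rho_grid
-- ===== SOURCE B (Python) =====
-- def makeRhoGrid(rhos, rho_counts):
--     grid = [[]]
--     for count in reversed(rho_counts):
--         grid = [[rr] * count + row for row in grid for rr in rhos]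
--     return grid
-- ===== Notes on version B (the rewrite author's own statement) =====
-- stated objective: alternative
-- what changed: Replaces itertools.product plus a per-tuple zip-with-reversed extend loop by a single fold over reversed(rho_counts) that grows every row by its replicated segment while building the Cartesian product incrementally.
import Mathlib
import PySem

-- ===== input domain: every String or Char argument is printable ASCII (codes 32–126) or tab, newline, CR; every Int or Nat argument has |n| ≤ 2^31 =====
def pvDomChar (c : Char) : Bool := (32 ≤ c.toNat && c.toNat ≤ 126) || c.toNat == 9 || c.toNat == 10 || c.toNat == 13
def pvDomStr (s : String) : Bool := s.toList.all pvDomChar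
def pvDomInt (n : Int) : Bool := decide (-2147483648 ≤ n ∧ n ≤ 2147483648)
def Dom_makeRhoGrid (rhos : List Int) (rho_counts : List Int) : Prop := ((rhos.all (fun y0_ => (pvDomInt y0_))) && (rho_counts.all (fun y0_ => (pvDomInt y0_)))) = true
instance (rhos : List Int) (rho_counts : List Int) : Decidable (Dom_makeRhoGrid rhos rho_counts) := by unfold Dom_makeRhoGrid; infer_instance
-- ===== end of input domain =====

-- B builds the grid by a single fold over reversed(rho_counts), growing each row by a
-- replicated segment per dimension, instead of A's two phases (itertools.product, then
-- zip with reversed tuple and extend); objective: alternative decomposition, same cost.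

-- ===== PORT A =====
-- itertools.product(rhos, repeat=k), transliterated per its documented loop:
-- result = [[]]; for each of the k pools: result = [x+[y] for x in result for y in pool]
def pyProduct (rhos : List Int) (k : Nat) : List (List Int) :=
  (List.range k).foldl
    (fun res _ => res.flatMap (fun x => rhos.map (fun y => x ++ [y]))) [[]]

def makeRhoGrid (rhos : List Int) (rho_counts : List Int) : List (List Int) :=
  (pyProduct rhos rho_counts.length).map
    (fun raw_rhos =>
      (rho_counts.zip raw_rhos.reverse).foldl
        (fun this_list p => this_list ++ List.replicate p.1.toNat p.2) [])

-- ===== PORT B =====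
def makeRhoGrid_alt (rhos : List Int) (rho_counts : List Int) : List (List Int) :=
  rho_counts.reverse.foldl
    (fun grid count =>
      grid.flatMap (fun row => rhos.map (fun rr => List.replicate count.toNat rr ++ row)))
    [[]]

-- ===== PRECONDITION & SPEC =====
def Spec_makeRhoGrid (rhos : List Int) (rho_counts : List Int) (out : List (List Int)) : Prop := out = makeRhoGrid_alt rhos rho_counts
instance (rhos : List Int) (rho_counts : List Int) (out : List (List Int)) : Decidable (Spec_makeRhoGrid rhos rho_counts out) := by unfold Spec_makeRhoGrid; infer_instance

-- ===== CLAIM (what is proved, stated in full; the proofs are below) =====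
def Claim_equal_makeRhoGrid : Prop := ∀ (rhos : List Int) (rho_counts : List Int), Dom_makeRhoGrid rhos rho_counts → Spec_makeRhoGrid rhos rho_counts (makeRhoGrid rhos rho_counts)

-- ===== LEMMAS AND PROOFS =====

-- peeling the last (fastest-varying) coordinate of the product
theorem pyProduct_succ (rhos : List Int) (n : Nat) :
    pyProduct rhos (n + 1)
      = (pyProduct rhos n).flatMap (fun x => rhos.map (fun y => x ++ [y])) := by
  simp [pyProduct, List.range_succ]

-- A's inner loop as a flatMap over the zipped pairs
theorem rowA_flatMap (rho_counts : List Int) (raw : List Int) :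
    (rho_counts.zip raw.reverse).foldl
        (fun this_list p => this_list ++ List.replicate p.1.toNat p.2) []
      = (rho_counts.zip raw.reverse).flatMap (fun p => List.replicate p.1.toNat p.2) := by
  simpa using PySem.List.foldl_append_eq_flatMap (fun p : Int × Int => List.replicate p.1.toNat p.2) (rho_counts.zip raw.reverse) ([] : List Int)

-- B's fold peels the head count
theorem alt_cons (rhos : List Int) (c : Int) (cs : List Int) :
    makeRhoGrid_alt rhos (c :: cs)
      = (makeRhoGrid_alt rhos cs).flatMap
          (fun row => rhos.map (fun rr => List.replicate c.toNat rr ++ row)) := by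
  simp [makeRhoGrid_alt, List.reverse_cons, List.foldl_append]

theorem makeRhoGrid_eq (rhos : List Int) (rho_counts : List Int) :
    makeRhoGrid rhos rho_counts = makeRhoGrid_alt rhos rho_counts := by
  induction rho_counts with
  | nil => simp [makeRhoGrid, makeRhoGrid_alt, pyProduct]
  | cons c cs ih =>
    rw [alt_cons, ← ih]
    simp only [makeRhoGrid, List.length_cons, pyProduct_succ, List.map_flatMap,
      List.flatMap_map, rowA_flatMap]
    congr 1
    funext a
    simp [Function.comp, List.reverse_append]

-- ===== VERDICT (by name: the statement is the Claim_ definition above) =====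
theorem makeRhoGrid_spec : Claim_equal_makeRhoGrid := by
  intro rhos rho_counts _
  unfold Spec_makeRhoGrid
  exact makeRhoGrid_eq rhos rho_counts
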